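-- pv_equiv track=rewrite | github.com/James-R997/VigenereCipher | main.py | getSubtext
-- ===== SOURCE A (Python) =====
-- def getSubtext(cipher:str, keylen:int) -> dict:
--     '''returns a splitted subtexts for the length of the key -> dictionary'''
--
--     st = {str(i): [] for i in range(keylen)}        # st: subtext
--
--     cipherlen = len(cipher)
--     cycles = cipherlen // keylen
--     remainder = cipherlen % keylen
--     # cycles += remainder # to add the remainder chars to the cycle
--
--     for subtext in range(keylen):
--         index = subtext
--
--         for _ in range(cycles):
--             st[str(subtext)].append(cipher[index])
--             index += keylen
--
--         if subtext < remainder: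
--             st[str(subtext)].append(cipher[index])
--
--         st[str(subtext)] = "".join(st[str(subtext)])
--
--     return st
-- ===== SOURCE B (Python) =====
-- def getSubtext(cipher: str, keylen: int) -> dict:
--     '''returns a splitted subtexts for the length of the key -> dictionary'''
--     # one strided slice per subtext replaces the hand-rolled cycles/remainder bookkeeping
--     return {str(i): cipher[i::keylen] for i in range(keylen)}
-- ===== Notes on version B (the rewrite author's own statement) =====
-- stated objective: simpler
-- what changed: A's per-subtext inner loop with cycles/remainder/index bookkeeping over a floor-division is replaced by one strided slice cipher[i::keylen] per subtext in a dict comprehension; Pre_ excludes only keylen == 0, where A raises ZeroDivisionError.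
import Mathlib
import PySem

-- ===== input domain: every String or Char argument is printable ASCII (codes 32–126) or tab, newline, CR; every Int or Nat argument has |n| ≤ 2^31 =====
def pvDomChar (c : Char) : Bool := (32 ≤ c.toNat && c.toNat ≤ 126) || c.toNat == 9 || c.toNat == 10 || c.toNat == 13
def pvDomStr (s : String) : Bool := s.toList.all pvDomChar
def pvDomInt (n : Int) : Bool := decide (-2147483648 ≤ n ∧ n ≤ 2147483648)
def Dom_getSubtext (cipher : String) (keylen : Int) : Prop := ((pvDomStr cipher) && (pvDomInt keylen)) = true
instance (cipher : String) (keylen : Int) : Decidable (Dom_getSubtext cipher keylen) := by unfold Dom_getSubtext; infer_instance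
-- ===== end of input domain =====

-- B replaces A's per-subtext cycles/remainder bookkeeping by one strided slice cipher[i::keylen]
-- per subtext (objective: simpler).  Return-value equivalence is proved for keylen ≠ 0; at
-- keylen = 0 A raises ZeroDivisionError while B returns the empty dict.

-- ===== PORT A =====
-- Python's dict values are char lists while being built and strings afterwards; since every key
-- is joined exactly once, the homogeneous Lean dict keeps List Char values and applies the join
-- at return.  st[...].append(c) is Dict.modify with default [] — exact whenever the key exists,
-- which holds for every key str(subtext) touched.  cipher[index] is PySem.List.pyGet? on the
-- char list (IndexError = none never happens for keylen > 0, and for keylen < 0 the loop is empty).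
def getSubtext (cipher : String) (keylen : Int) : List (String × String) :=
  let st0 : PySem.Dict String (List Char) :=
    (PySem.List.pyRange 0 keylen 1).foldl
      (fun d i => d.insert (PySem.Int.toStr i) []) PySem.Dict.empty
  let cs := cipher.toList
  let cipherlen : Int := PySem.List.len cs
  let cycles : Int := PySem.Int.floordiv cipherlen keylen
  let remainder : Int := PySem.Int.mod cipherlen keylen
  let st := (PySem.List.pyRange 0 keylen 1).foldl
    (fun d subtext =>
      let p := (PySem.List.pyRange 0 cycles 1).foldl
        (fun (p : PySem.Dict String (List Char) × Int) _ =>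
          (p.1.modify (PySem.Int.toStr subtext) []
             (fun l => l ++ (PySem.List.pyGet? cs p.2).toList), p.2 + keylen))
        (d, subtext)
      if subtext < remainder then
        p.1.modify (PySem.Int.toStr subtext) []
          (fun l => l ++ (PySem.List.pyGet? cs p.2).toList)
      else p.1)
    st0
  st.items.map (fun p => (p.1, String.ofList p.2))

-- ===== PORT B =====
-- the dict comprehension is an ordered loop of inserts into an empty dict; cipher[i::keylen] is
-- PySem.Str.slice? (its step is keylen ≠ 0 whenever the loop body runs, so getD "" never fires).
def getSubtext_alt (cipher : String) (keylen : Int) : List (String × String) :=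
  ((PySem.List.pyRange 0 keylen 1).foldl
    (fun d i => d.insert (PySem.Int.toStr i)
      ((PySem.Str.slice? cipher (some i) none keylen).getD ""))
    PySem.Dict.empty).items

-- ===== PRECONDITION & SPEC =====
-- Pre_ excludes exactly keylen = 0, where A raises ZeroDivisionError (cipherlen // keylen).
def Pre_getSubtext (cipher : String) (keylen : Int) : Prop := keylen ≠ 0
instance (cipher : String) (keylen : Int) : Decidable (Pre_getSubtext cipher keylen) := by
  unfold Pre_getSubtext; infer_instance
def pvWitness_getSubtext : String × Int := ("HELLOWORLD", 3)

def Spec_getSubtext (cipher : String) (keylen : Int) (out : List (String × String)) : Prop := out = getSubtext_alt cipher keylen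
instance (cipher : String) (keylen : Int) (out : List (String × String)) : Decidable (Spec_getSubtext cipher keylen out) := by unfold Spec_getSubtext; infer_instance

-- ===== CLAIM (what is proved, stated in full; the proofs are below) =====
def Claim_equal_getSubtext : Prop := ∀ (cipher : String) (keylen : Int), Dom_getSubtext cipher keylen → Pre_getSubtext cipher keylen → Spec_getSubtext cipher keylen (getSubtext cipher keylen)

-- ===== LEMMAS AND PROOFS =====

-- ---- str(n) is injective on nonnegative integers ----
def pvVal (l : List Char) : Nat := l.foldl (fun a c => 10 * a + (c.toNat - 48)) 0

theorem pvVal_foldl_from (l : List Char) : ∀ (a : Nat),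
    l.foldl (fun a c => 10 * a + (c.toNat - 48)) a = a * 10 ^ l.length + pvVal l := by
  induction l with
  | nil => intro a; simp [pvVal]
  | cons c t ih =>
    intro a
    simp only [List.foldl_cons, pvVal, List.length_cons]
    rw [ih, ih (10 * 0 + (c.toNat - 48))]
    ring

theorem pvVal_append (l m : List Char) :
    pvVal (l ++ m) = pvVal l * 10 ^ m.length + pvVal m := by
  simp only [pvVal, List.foldl_append]
  rw [pvVal_foldl_from m (List.foldl _ 0 l)]
  rfl

theorem pv_digitChar_toNat (k : Nat) (h : k < 10) : (Nat.digitChar k).toNat - 48 = k := by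
  interval_cases k <;> decide

theorem pvCore_append (b f : Nat) : ∀ (n : Nat) (acc : List Char),
    Nat.toDigitsCore b f n acc = Nat.toDigitsCore b f n [] ++ acc := by
  induction f with
  | zero => intro n acc; simp [Nat.toDigitsCore]
  | succ f ih =>
    intro n acc
    simp only [Nat.toDigitsCore]
    split
    · rfl
    · rw [ih (n / b) (Nat.digitChar (n % b) :: acc), ih (n / b) [Nat.digitChar (n % b)]]
      simp

theorem pvVal_core (f : Nat) : ∀ (n : Nat), n < 10 ^ f →
    pvVal (Nat.toDigitsCore 10 f n []) = n := by
  induction f with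
  | zero =>
    intro n h
    have hz : n = 0 := by omega
    subst hz
    simp [Nat.toDigitsCore, pvVal]
  | succ f ih =>
    intro n h
    simp only [Nat.toDigitsCore]
    split
    · rename_i h0
      simp [pvVal, pv_digitChar_toNat (n % 10) (by omega)]
      omega
    · rename_i h0
      rw [pvCore_append, pvVal_append, ih (n / 10) (by omega)]
      simp [pvVal, pv_digitChar_toNat (n % 10) (by omega)]
      omega

theorem pvVal_toDigits (n : Nat) : pvVal (Nat.toDigits 10 n) = n := by
  have h1 : n < 10 ^ n := Nat.lt_pow_self (by omega)
  have h2 : (10:Nat) ^ n ≤ 10 ^ (n + 1) := Nat.pow_le_pow_right (by omega) (by omega)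
  exact pvVal_core (n + 1) n (by omega)

theorem pvToStr_inj {m n : Int} (hm : 0 ≤ m) (hn : 0 ≤ n)
    (h : PySem.Int.toStr m = PySem.Int.toStr n) : m = n := by
  have h2 : PySem.Int.toChars m = PySem.Int.toChars n := by
    rw [← PySem.Int.toList_toStr, ← PySem.Int.toList_toStr, h]
  simp only [PySem.Int.toChars, if_neg (by omega : ¬ m < 0), if_neg (by omega : ¬ n < 0)] at h2
  have := congrArg pvVal h2
  rw [pvVal_toDigits, pvVal_toDigits] at this
  omega

theorem pvKeysNodup (b : Int) :
    ((PySem.List.pyRange 0 b 1).map PySem.Int.toStr).Nodup := by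
  apply List.Nodup.map_on
  · intro x hx y hy hxy
    exact pvToStr_inj (PySem.List.mem_pyRange_one.mp hx).1 (PySem.List.mem_pyRange_one.mp hy).1 hxy
  · exact PySem.List.nodup_pyRange_one 0 b

-- ---- generic: a fold that ignores the elements is an iterate ----
theorem pvFoldl_ignore {σ β : Type} (step : σ → σ) (l : List β) (init : σ) :
    l.foldl (fun s _ => step s) init = step^[l.length] init := by
  induction l generalizing init with
  | nil => rfl
  | cons x t ih => simpa [Function.iterate_succ_apply] using ih (step init)

theorem pvFilterMap_eq_flatMap {α β : Type} (f : α → Option β) (l : List α) :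
    l.filterMap f = l.flatMap (fun x => (f x).toList) := by
  induction l with
  | nil => rfl
  | cons x t ih => cases hx : f x <;> simp [List.filterMap_cons, hx, ih]

-- ---- A's inner loop ----
def pvStep (cs : List Char) (klen : Int) (k : String) :
    PySem.Dict String (List Char) × Int → PySem.Dict String (List Char) × Int :=
  fun p => (p.1.modify k [] (fun l => l ++ (PySem.List.pyGet? cs p.2).toList), p.2 + klen)

def pvGather (cs : List Char) (i0 klen : Int) : Nat → List Char
  | 0 => []
  | n+1 => (PySem.List.pyGet? cs i0).toList ++ pvGather cs (i0 + klen) klen n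

theorem pvIter_snd (cs : List Char) (klen : Int) (k : String) :
    ∀ (n : Nat) (d : PySem.Dict String (List Char)) (i0 : Int),
    ((pvStep cs klen k)^[n] (d, i0)).2 = i0 + n * klen := by
  intro n
  induction n with
  | zero => intro d i0; simp
  | succ n ih =>
    intro d i0
    rw [Function.iterate_succ_apply]
    show ((pvStep cs klen k)^[n]
      (d.modify k [] (fun l => l ++ (PySem.List.pyGet? cs i0).toList), i0 + klen)).2 = _
    rw [ih]
    push_cast
    ring

theorem pvIter_getD_self (cs : List Char) (klen : Int) (k : String) :
    ∀ (n : Nat) (d : PySem.Dict String (List Char)) (i0 : Int),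
    ((pvStep cs klen k)^[n] (d, i0)).1.getD k [] = d.getD k [] ++ pvGather cs i0 klen n := by
  intro n
  induction n with
  | zero => intro d i0; simp [pvGather]
  | succ n ih =>
    intro d i0
    rw [Function.iterate_succ_apply]
    show ((pvStep cs klen k)^[n]
      (d.modify k [] (fun l => l ++ (PySem.List.pyGet? cs i0).toList), i0 + klen)).1.getD k [] = _
    rw [ih, PySem.Dict.getD_modify_self, pvGather, List.append_assoc]

theorem pvIter_getD_ne (cs : List Char) (klen : Int) (k k' : String) (hne : k' ≠ k) :
    ∀ (n : Nat) (d : PySem.Dict String (List Char)) (i0 : Int),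
    ((pvStep cs klen k)^[n] (d, i0)).1.getD k' [] = d.getD k' [] := by
  intro n
  induction n with
  | zero => intro d i0; simp
  | succ n ih =>
    intro d i0
    rw [Function.iterate_succ_apply]
    show ((pvStep cs klen k)^[n]
      (d.modify k [] (fun l => l ++ (PySem.List.pyGet? cs i0).toList), i0 + klen)).1.getD k' [] = _
    rw [ih, PySem.Dict.getD_modify_of_ne _ _ _ hne]

theorem pvIter_keys (cs : List Char) (klen : Int) (k : String) :
    ∀ (n : Nat) (d : PySem.Dict String (List Char)) (i0 : Int), k ∈ d.keys →
    ((pvStep cs klen k)^[n] (d, i0)).1.keys = d.keys := by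
  intro n
  induction n with
  | zero => intro d i0 _; simp
  | succ n ih =>
    intro d i0 hk
    rw [Function.iterate_succ_apply]
    show ((pvStep cs klen k)^[n]
      (d.modify k [] (fun l => l ++ (PySem.List.pyGet? cs i0).toList), i0 + klen)).1.keys = _
    have hc : (d.modify k [] (fun l => l ++ (PySem.List.pyGet? cs i0).toList)).keys = d.keys := by
      rw [PySem.Dict.keys_modify]
      exact PySem.Dict.keys_insert_of_contains d _ ((PySem.Dict.contains_iff_mem_keys d k).mpr hk)
    rw [ih _ _ (by rw [hc]; exact hk), hc]

-- the chars A appends to subtext i (cyc full cycles, then the remainder char)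
def pvChunk (cs : List Char) (klen cyc rem i : Int) : List Char :=
  pvGather cs i klen cyc.toNat ++
    (if i < rem then (PySem.List.pyGet? cs (i + (cyc.toNat : Int) * klen)).toList else [])

theorem pvGather_eq_flatMap (cs : List Char) (klen : Int) :
    ∀ (n : Nat) (i0 : Int), pvGather cs i0 klen n =
      (List.range n).flatMap (fun (j : Nat) => (PySem.List.pyGet? cs (i0 + klen * (j : Int))).toList) := by
  intro n
  induction n with
  | zero => intro i0; simp [pvGather]
  | succ n ih =>
    intro i0
    rw [pvGather, ih (i0 + klen), List.range_succ_eq_map]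
    rw [List.flatMap_cons, List.flatMap_map]
    congr 1
    · norm_num
    · apply List.flatMap_congr
      intro j _
      congr 2
      push_cast
      ring

-- ===== A-side characterization =====

-- A's outer loop body, named
def pvBody (cs : List Char) (klen cyc rem : Int)
    (d : PySem.Dict String (List Char)) (subtext : Int) : PySem.Dict String (List Char) :=
  let p := (PySem.List.pyRange 0 cyc 1).foldl
    (fun (p : PySem.Dict String (List Char) × Int) _ =>
      (p.1.modify (PySem.Int.toStr subtext) []
         (fun l => l ++ (PySem.List.pyGet? cs p.2).toList), p.2 + klen))
    (d, subtext)
  if subtext < rem then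
    p.1.modify (PySem.Int.toStr subtext) []
      (fun l => l ++ (PySem.List.pyGet? cs p.2).toList)
  else p.1

theorem pvInner_eq_iter (cs : List Char) (klen cyc : Int) (k : String)
    (d : PySem.Dict String (List Char)) (i0 : Int) :
    (PySem.List.pyRange 0 cyc 1).foldl
      (fun (p : PySem.Dict String (List Char) × Int) _ =>
        (p.1.modify k [] (fun l => l ++ (PySem.List.pyGet? cs p.2).toList), p.2 + klen))
      (d, i0) = (pvStep cs klen k)^[cyc.toNat] (d, i0) := by
  show (PySem.List.pyRange 0 cyc 1).foldl (fun p (_ : Int) => pvStep cs klen k p) (d, i0) = _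
  rw [pvFoldl_ignore (pvStep cs klen k) _ (d, i0)]
  congr 1
  rw [PySem.List.length_pyRange_one]
  simp

theorem pvBody_getD_self (cs : List Char) (klen cyc rem : Int) (hcyc : 0 ≤ cyc)
    (d : PySem.Dict String (List Char)) (i : Int) :
    (pvBody cs klen cyc rem d i).getD (PySem.Int.toStr i) [] =
      d.getD (PySem.Int.toStr i) [] ++ pvChunk cs klen cyc rem i := by
  rw [pvBody]
  simp only [pvInner_eq_iter]
  rw [pvChunk]
  split
  · rw [PySem.Dict.getD_modify_self, pvIter_getD_self, pvIter_snd, List.append_assoc]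
  · rw [pvIter_getD_self, List.append_nil]

theorem pvBody_getD_ne (cs : List Char) (klen cyc rem : Int)
    (d : PySem.Dict String (List Char)) (i : Int) (k' : String)
    (hne : k' ≠ PySem.Int.toStr i) :
    (pvBody cs klen cyc rem d i).getD k' [] = d.getD k' [] := by
  rw [pvBody]
  simp only [pvInner_eq_iter]
  split
  · rw [PySem.Dict.getD_modify_of_ne _ _ _ hne, pvIter_getD_ne _ _ _ _ hne]
  · rw [pvIter_getD_ne _ _ _ _ hne]

theorem pvBody_keys (cs : List Char) (klen cyc rem : Int)
    (d : PySem.Dict String (List Char)) (i : Int) (hk : PySem.Int.toStr i ∈ d.keys) :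
    (pvBody cs klen cyc rem d i).keys = d.keys := by
  rw [pvBody]
  simp only [pvInner_eq_iter]
  have hik := pvIter_keys cs klen (PySem.Int.toStr i) cyc.toNat d i hk
  split
  · rw [PySem.Dict.keys_modify]
    rw [PySem.Dict.keys_insert_of_contains _ _ (by
      rw [PySem.Dict.contains_iff_mem_keys, hik]; exact hk)]
    exact hik
  · exact hik

-- initial dict
theorem pvSt0_items (b : Int) :
    ((PySem.List.pyRange 0 b 1).foldl
      (fun d i => d.insert (PySem.Int.toStr i) ([] : List Char)) PySem.Dict.empty).items
      = (PySem.List.pyRange 0 b 1).map (fun i => (PySem.Int.toStr i, ([] : List Char))) := by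
  rw [PySem.Dict.items_foldl_insert_fresh _ _ _ _
    (fun a _ => PySem.Dict.contains_empty _) (pvKeysNodup b)]
  rfl

theorem pvSt0_keys (b : Int) :
    ((PySem.List.pyRange 0 b 1).foldl
      (fun d i => d.insert (PySem.Int.toStr i) ([] : List Char)) PySem.Dict.empty).keys
      = (PySem.List.pyRange 0 b 1).map PySem.Int.toStr := by
  simp only [PySem.Dict.keys, pvSt0_items b, List.map_map]
  rfl

theorem pvSt0_getD (b i : Int) (hi : i ∈ PySem.List.pyRange 0 b 1) :
    ((PySem.List.pyRange 0 b 1).foldl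
      (fun d i => d.insert (PySem.Int.toStr i) ([] : List Char)) PySem.Dict.empty).getD
      (PySem.Int.toStr i) [] = [] := by
  apply PySem.Dict.getD_of_mem_items
  · rw [pvSt0_items b]
    exact List.mem_map.mpr ⟨i, hi, rfl⟩
  · rw [pvSt0_keys b]; exact pvKeysNodup b

-- outer loop invariant
theorem pvOuter_inv (cs : List Char) (klen cyc rem : Int) (hcyc : 0 ≤ cyc) :
    ∀ (m : Int), 0 ≤ m → m ≤ klen →
    (((PySem.List.pyRange 0 m 1).foldl (pvBody cs klen cyc rem)
        ((PySem.List.pyRange 0 klen 1).foldl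
          (fun d i => d.insert (PySem.Int.toStr i) ([] : List Char)) PySem.Dict.empty)).keys
      = (PySem.List.pyRange 0 klen 1).map PySem.Int.toStr) ∧
    (∀ i : Int, 0 ≤ i → i < klen →
      ((PySem.List.pyRange 0 m 1).foldl (pvBody cs klen cyc rem)
        ((PySem.List.pyRange 0 klen 1).foldl
          (fun d i => d.insert (PySem.Int.toStr i) ([] : List Char)) PySem.Dict.empty)).getD
        (PySem.Int.toStr i) []
        = if i < m then pvChunk cs klen cyc rem i else []) := by
  intro m hm
  induction m, hm using Int.le_induction with
  | base =>
    intro _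
    rw [PySem.List.pyRange_one_eq_nil (le_refl (0:Int))]
    refine ⟨pvSt0_keys klen, ?_⟩
    intro i hi0 hik
    rw [if_neg (by omega)]
    exact pvSt0_getD klen i (PySem.List.mem_pyRange_one.mpr ⟨hi0, hik⟩)
  | succ m hm ih =>
    intro hmk
    obtain ⟨ihk, ihg⟩ := ih (by omega)
    rw [PySem.List.pyRange_one_succ_right (by omega), List.foldl_append, List.foldl_cons,
      List.foldl_nil]
    have hmem : PySem.Int.toStr m ∈ (PySem.List.pyRange 0 klen 1).map PySem.Int.toStr :=
      List.mem_map.mpr ⟨m, PySem.List.mem_pyRange_one.mpr ⟨hm, by omega⟩, rfl⟩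
    constructor
    · rw [pvBody_keys _ _ _ _ _ _ (by rw [ihk]; exact hmem), ihk]
    · intro i hi0 hik
      by_cases hi : i = m
      · subst hi
        rw [pvBody_getD_self _ _ _ _ hcyc, ihg i hi0 hik, if_neg (by omega), if_pos (by omega)]
        simp
      · have hne : PySem.Int.toStr i ≠ PySem.Int.toStr m := by
          intro h; exact hi (pvToStr_inj hi0 hm h)
        rw [pvBody_getD_ne _ _ _ _ _ _ _ hne, ihg i hi0 hik]
        by_cases him : i < m
        · rw [if_pos him, if_pos (by omega)]
        · rw [if_neg him, if_neg (by omega)]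

-- A's value for positive keylen
theorem pvA_eq (cipher : String) (keylen : Int) (hk : 0 < keylen) :
    getSubtext cipher keylen =
      (PySem.List.pyRange 0 keylen 1).map (fun i =>
        (PySem.Int.toStr i, String.ofList (pvChunk cipher.toList keylen
          (PySem.Int.floordiv (PySem.List.len cipher.toList) keylen)
          (PySem.Int.mod (PySem.List.len cipher.toList) keylen) i))) := by
  have hcyc : 0 ≤ PySem.Int.floordiv (PySem.List.len cipher.toList) keylen := by
    rw [PySem.Int.floordiv, Int.fdiv_eq_ediv, if_pos (Or.inl (by omega))]
    simp only [PySem.List.len_eq]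
    have := Int.ediv_nonneg (a := (cipher.toList.length : Int)) (b := keylen) (by positivity) (by omega)
    omega
  obtain ⟨hkeys, hgetD⟩ := pvOuter_inv cipher.toList keylen
    (PySem.Int.floordiv (PySem.List.len cipher.toList) keylen)
    (PySem.Int.mod (PySem.List.len cipher.toList) keylen) hcyc keylen (by omega) (le_refl _)
  show ((PySem.List.pyRange 0 keylen 1).foldl (pvBody cipher.toList keylen _ _) _).items.map _ = _
  rw [PySem.Dict.items_eq_map_keys _ (by rw [hkeys]; exact pvKeysNodup keylen) []]
  rw [hkeys, List.map_map, List.map_map]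
  apply List.map_congr_left
  intro i hi
  obtain ⟨hi0, hik⟩ := PySem.List.mem_pyRange_one.mp hi
  simp only [Function.comp]
  rw [hgetD i hi0 hik, if_pos hik]

-- ===== B-side characterization =====
theorem pvB_eq (cipher : String) (keylen : Int) :
    getSubtext_alt cipher keylen =
      (PySem.List.pyRange 0 keylen 1).map (fun i =>
        (PySem.Int.toStr i, (PySem.Str.slice? cipher (some i) none keylen).getD "")) := by
  show ((PySem.List.pyRange 0 keylen 1).foldl _ PySem.Dict.empty).items = _
  rw [PySem.Dict.items_foldl_insert_fresh _ _ _ _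
    (fun a _ => PySem.Dict.contains_empty _) (pvKeysNodup keylen)]
  rfl

-- ===== pointwise agreement of the two per-key values =====
theorem pvPointwise (cipher : String) (keylen i : Int) (hk : 0 < keylen)
    (hi0 : 0 ≤ i) (hik : i < keylen) :
    String.ofList (pvChunk cipher.toList keylen
        (PySem.Int.floordiv (PySem.List.len cipher.toList) keylen)
        (PySem.Int.mod (PySem.List.len cipher.toList) keylen) i)
      = (PySem.Str.slice? cipher (some i) none keylen).getD "" := by
  have hkne : keylen ≠ 0 := by omega
  have hfd : PySem.Int.floordiv (PySem.List.len cipher.toList) keylen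
      = (cipher.toList.length : Int) / keylen := by
    rw [PySem.Int.floordiv, Int.fdiv_eq_ediv, if_pos (Or.inl (by omega : (0:Int) ≤ keylen))]
    rw [PySem.List.len_eq]
    ring
  have hfm : PySem.Int.mod (PySem.List.len cipher.toList) keylen
      = (cipher.toList.length : Int) % keylen := by
    rw [PySem.Int.mod, Int.fmod_eq_emod, if_pos (Or.inl (by omega : (0:Int) ≤ keylen))]
    rw [PySem.List.len_eq]
    ring
  rw [hfd, hfm]
  simp only [PySem.Str.slice?, PySem.Chars.slice?_eq_listSlice?]
  simp only [PySem.List.slice?, PySem.List.sliceIndices]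
  rw [if_neg hkne]
  simp only [if_neg (show ¬ keylen < 0 by omega), if_pos hk, if_neg (show ¬ i < 0 by omega)]
  simp only [Option.map_some, Option.getD_some]
  set cs := cipher.toList
  set L : Int := (cs.length : Int) with hLdef
  set q : Int := L / keylen with hqdef
  set r : Int := L % keylen with hrdef
  have hq0 : 0 ≤ q := Int.ediv_nonneg (by positivity) (by omega)
  have hr0 : 0 ≤ r := Int.emod_nonneg L hkne
  have hrk : r < keylen := Int.emod_lt_of_pos L hk
  have hid : keylen * q + r = L := Int.ediv_add_emod L keylen
  have hmn : 0 ≤ keylen * q := mul_nonneg (by omega) hq0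
  congr 1
  by_cases hiL : i < L
  · -- the slice starts inside the string
    rw [min_eq_left (by omega : i ≤ L), if_pos hiL]
    have hcount : (L - i + keylen - 1) / keylen = q + (if i < r then 1 else 0) := by
      by_cases hir : i < r
      · have egen : ∀ (L' q' r' : Int), keylen * q' + r' = L' →
            L' - i + keylen - 1 = (r' - i - 1) + (q' + 1) * keylen := by
          intro L' q' r' h; rw [← h]; ring
        have e1 := egen L q r hid
        rw [e1, Int.add_mul_ediv_right _ _ hkne,
          Int.ediv_eq_zero_of_lt (by omega) (by omega)]
        simp [hir]
      · have egen : ∀ (L' q' r' : Int), keylen * q' + r' = L' →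
            L' - i + keylen - 1 = (keylen + r' - i - 1) + q' * keylen := by
          intro L' q' r' h; rw [← h]; ring
        have e1 := egen L q r hid
        rw [e1, Int.add_mul_ediv_right _ _ hkne,
          Int.ediv_eq_zero_of_lt (by omega) (by omega)]
        simp [hir]
    rw [hcount, pvFilterMap_eq_flatMap, pvChunk, pvGather_eq_flatMap]
    by_cases hir : i < r
    · rw [if_pos hir, if_pos hir]
      have hN : (q + 1).toNat = q.toNat + 1 := by omega
      rw [hN, List.range_succ, List.flatMap_append, List.flatMap_cons, List.flatMap_nil]
      congr 1
      · apply List.flatMap_congr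
        intro j hj
        rw [PySem.List.pyGet?_of_nonneg cs (show (0:Int) ≤ i + keylen * (j:Int) by positivity)]
      · rw [PySem.List.pyGet?_of_nonneg cs
          (show (0:Int) ≤ i + (q.toNat : Int) * keylen by positivity), List.append_nil]
        congr 3
        push_cast [Int.toNat_of_nonneg hq0]
        ring
    · rw [if_neg hir, if_neg hir, List.append_nil, add_zero]
      apply List.flatMap_congr
      intro j hj
      rw [PySem.List.pyGet?_of_nonneg cs (show (0:Int) ≤ i + keylen * (j:Int) by positivity)]
  · -- i points past the end: the slice is empty and so is every fetched index
    rw [min_eq_right (by omega : L ≤ i), if_neg (by omega : ¬ L < L)]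
    rw [List.range_zero, List.filterMap_nil, pvChunk,
      if_neg (by omega : ¬ i < r), List.append_nil, pvGather_eq_flatMap]
    rw [List.flatMap_eq_nil_iff]
    intro j hj
    have h1 : 0 ≤ keylen * (j:Int) := by positivity
    rw [PySem.List.pyGet?_of_nonneg cs (by omega)]
    simp only [Option.toList_eq_nil_iff]
    apply List.getElem?_eq_none
    omega

-- ===== final assembly =====
theorem pvMain (cipher : String) (keylen : Int) (hk : keylen ≠ 0) :
    getSubtext cipher keylen = getSubtext_alt cipher keylen := by
  rcases lt_or_gt_of_ne hk with hneg | hpos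
  · -- keylen < 0 : both loops are empty, both return the empty dict
    simp [getSubtext, getSubtext_alt, PySem.List.pyRange_one_eq_nil (by omega : keylen ≤ 0)]
    rfl
  · rw [pvA_eq cipher keylen hpos, pvB_eq]
    apply List.map_congr_left
    intro i hi
    obtain ⟨hi0, hik⟩ := PySem.List.mem_pyRange_one.mp hi
    rw [pvPointwise cipher keylen i hpos hi0 hik]

-- ===== VERDICT (by name: the statement is the Claim_ definition above) =====
theorem getSubtext_spec : Claim_equal_getSubtext := by
  intro cipher keylen _ hpre
  exact pvMain cipher keylen hpre
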